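-- pv_equiv track=rewrite | github.com/kfaryn/Liga-Fanow | utils.py | string_divide
-- ===== SOURCE A (Python) =====
-- def string_divide(string, min_space_number=2):
--     """
--     Splits a given string into substrings based on consecutive spaces, while allowing for a minimum number of spaces
--     between substrings. The function aims to identify meaningful segments of the input string, considering a specified
--     minimum space count to distinguish between substrings.
--
--     Parameters:
--     - string (str): The input string to be divided.
--     - min_space_number (int): The minimum number of consecutive spaces required to separate substrings. Default is 2.
--
--     Returns:
--     - list of str: A list containing the identified substrings from the input string, excluding leading and trailing
--       whitespaces. Empty substrings are excluded from the result.
--     """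
--     substrings = []
--     current_podstring = ""
--     space_number = 0
--
--     for sign in string:
--         if sign == ' ':
--             if space_number >= min_space_number-1:
--                 substrings.append(current_podstring.strip())
--                 current_podstring = ""
--             elif current_podstring.strip():
--                 current_podstring += ' '
--             space_number += 1
--         else:
--             current_podstring += sign
--             space_number = 0
--
--     if current_podstring.strip():
--         substrings.append(current_podstring.strip())
--
--     substrings = [substring for substring in substrings if substring.strip()]
--
--     return substrings
-- ===== SOURCE B (Python) =====
-- import re
--
-- def string_divide(string, min_space_number=2):
--     n = max(min_space_number, 1)
--     pieces = re.split(' {%d,}' % n, string)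
--     return [p for p in (piece.strip() for piece in pieces) if p]
-- ===== Notes on version B (the rewrite author's own statement) =====
-- stated objective: idiomatic
-- what changed: A's single hand-written scan that counts consecutive spaces and conditionally accumulates characters is replaced by a regex split on maximal runs of >= max(min_space_number,1) spaces followed by a plain strip-and-filter comprehension.
import Mathlib
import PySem

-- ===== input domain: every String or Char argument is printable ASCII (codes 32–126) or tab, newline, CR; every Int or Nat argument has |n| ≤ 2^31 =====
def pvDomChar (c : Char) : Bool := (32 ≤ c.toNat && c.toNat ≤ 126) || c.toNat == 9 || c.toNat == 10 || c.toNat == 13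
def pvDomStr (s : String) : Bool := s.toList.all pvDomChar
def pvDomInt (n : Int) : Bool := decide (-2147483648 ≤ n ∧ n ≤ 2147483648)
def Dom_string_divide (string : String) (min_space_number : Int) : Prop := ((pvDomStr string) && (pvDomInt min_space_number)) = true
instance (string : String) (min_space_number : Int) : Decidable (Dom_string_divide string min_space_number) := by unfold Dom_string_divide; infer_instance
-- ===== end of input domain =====

-- B replaces A's character-by-character scan with counting/append logic by a regex-style split
-- on maximal runs of ≥ n spaces followed by separate strip-and-filter passes (objective: idiomatic).

-- ===== PORT A =====
-- one iteration of A's `for sign in string` loop; state = (substrings, current_podstring, space_number)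
def pvStepA (min_space_number : Int) (st : List (List Char) × List Char × Int) (sign : Char) :
    List (List Char) × List Char × Int :=
  if sign = ' ' then
    if st.2.2 ≥ min_space_number - 1 then
      (st.1 ++ [PySem.Chars.strip st.2.1], [], st.2.2 + 1)
    else if (PySem.Chars.strip st.2.1).isEmpty = false then
      (st.1, st.2.1 ++ [' '], st.2.2 + 1)
    else
      (st.1, st.2.1, st.2.2 + 1)
  else
    (st.1, st.2.1 ++ [sign], 0)

def string_divide (string : String) (min_space_number : Int) : List String :=
  let st := string.toList.foldl (pvStepA min_space_number) ([], [], 0)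
  let substrings :=
    if (PySem.Chars.strip st.2.1).isEmpty = false then st.1 ++ [PySem.Chars.strip st.2.1] else st.1
  (substrings.filter (fun s => (PySem.Chars.strip s).isEmpty = false)).map String.ofList

-- ===== PORT B =====
-- port of Source B's `re.split(' {%d,}' % n, string)`: split at each MAXIMAL run of at least n
-- spaces (exact for this pattern: the regex separators are the maximal runs of ≥ n spaces)
def pvSplitRuns (n : Nat) (acc : List Char) : List Char → List (List Char)
  | [] => [acc.reverse]
  | c :: rest =>
    if c = ' ' then
      let run := c :: List.takeWhile (fun d => d == ' ') rest
      let tail := List.dropWhile (fun d => d == ' ') rest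
      if n ≤ run.length then acc.reverse :: pvSplitRuns n [] tail
      else pvSplitRuns n (run.reverse ++ acc) tail
    else pvSplitRuns n (c :: acc) rest
termination_by l => l.length
decreasing_by
  · have := List.length_dropWhile_le (fun d => d == ' ') rest
    simp only [List.length_cons]; omega
  · have := List.length_dropWhile_le (fun d => d == ' ') rest
    simp only [List.length_cons]; omega
  · simp only [List.length_cons]; omega

def string_divide_alt (string : String) (min_space_number : Int) : List String :=
  let n := (max min_space_number 1).toNat
  let pieces := pvSplitRuns n [] string.toList
  (((pieces.map PySem.Chars.strip).filter (fun p => p.isEmpty = false)).map String.ofList)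

-- ===== PRECONDITION & SPEC =====
def Spec_string_divide (string : String) (min_space_number : Int) (out : List String) : Prop := out = string_divide_alt string min_space_number
instance (string : String) (min_space_number : Int) (out : List String) : Decidable (Spec_string_divide string min_space_number out) := by unfold Spec_string_divide; infer_instance

-- ===== CLAIM (what is proved, stated in full; the proofs are below) =====
def Claim_equal_string_divide : Prop := ∀ (string : String) (min_space_number : Int), Dom_string_divide string min_space_number → Spec_string_divide string min_space_number (string_divide string min_space_number)

-- ===== LEMMAS AND PROOFS =====

-- A's loop with the substrings accumulator dropped and the trailing strip/append/filter folded
-- in: the stripped nonempty segments A still produces from state (cur, sp) on input `rest`.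
def pvG (n : Nat) : List Char → List Char → Nat → List (List Char)
  | [], cur, _ =>
      if (PySem.Chars.strip cur).isEmpty = false then [PySem.Chars.strip cur] else []
  | c :: rest, cur, sp =>
      if c = ' ' then
        if n ≤ sp + 1 then
          (if (PySem.Chars.strip cur).isEmpty = false then [PySem.Chars.strip cur] else []) ++
            pvG n rest [] (sp + 1)
        else if (PySem.Chars.strip cur).isEmpty = false then pvG n rest (cur ++ [' ']) (sp + 1)
        else pvG n rest cur (sp + 1)
      else pvG n rest (cur ++ [c]) 0

-- a character-at-a-time formulation of "split on maximal runs of ≥ n spaces":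
-- cur = raw segment so far, sp = pending spaces not yet classified
def pvH (n : Nat) : List Char → List Char → Nat → List (List Char)
  | [], cur, sp => if n ≤ sp then [cur, []] else [cur ++ List.replicate sp ' ']
  | c :: rest, cur, sp =>
      if c = ' ' then pvH n rest cur (sp + 1)
      else if n ≤ sp then cur :: pvH n rest [c] 0
      else pvH n rest (cur ++ List.replicate sp ' ' ++ [c]) 0

-- B's post-processing at the List-Char level
def pvSF (l : List (List Char)) : List (List Char) :=
  (l.map PySem.Chars.strip).filter (fun p => p.isEmpty = false)

-- A's post-processing (trailing append + filter) at the List-Char level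
def pvPostA (st : List (List Char) × List Char × Int) : List (List Char) :=
  (if (PySem.Chars.strip st.2.1).isEmpty = false then st.1 ++ [PySem.Chars.strip st.2.1] else st.1).filter
    (fun s => (PySem.Chars.strip s).isEmpty = false)

-- ---- facts about strip / lstrip / rstrip ----

theorem pv_dropWhile_cons_head {p : Char → Bool} {l : List Char} {c : Char} {t : List Char}
    (h : l.dropWhile p = c :: t) : p c = false := by
  have hne : l.dropWhile p ≠ [] := by simp [h]
  have h2 := List.head_dropWhile_not p hne
  have h3 : (l.dropWhile p).head hne = c := by simp [h]
  rwa [h3] at h2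

theorem pv_lstrip_of_head_false {c : Char} {t : List Char} (hc : PySem.Chars.isspace c = false) :
    PySem.Chars.lstrip (c :: t) = c :: t := by
  simp [PySem.Chars.lstrip, hc]

theorem pv_lstrip_lstrip (y : List Char) :
    PySem.Chars.lstrip (PySem.Chars.lstrip y) = PySem.Chars.lstrip y := by
  cases h : PySem.Chars.lstrip y with
  | nil => simp [PySem.Chars.lstrip]
  | cons c t => exact pv_lstrip_of_head_false (pv_dropWhile_cons_head (by simpa [PySem.Chars.lstrip] using h))

theorem pv_rstrip_prefix (z : List Char) : PySem.Chars.rstrip z <+: z := by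
  obtain ⟨pre, hp⟩ := List.dropWhile_suffix (l := z.reverse) (p := PySem.Chars.isspace)
  refine ⟨pre.reverse, ?_⟩
  rw [PySem.Chars.rstrip]
  calc (List.dropWhile PySem.Chars.isspace z.reverse).reverse ++ pre.reverse
      = (pre ++ List.dropWhile PySem.Chars.isspace z.reverse).reverse := by
        rw [List.reverse_append]
    _ = z := by rw [hp, List.reverse_reverse]

theorem pv_lstrip_rstrip_of_lstrip (z : List Char) (h : PySem.Chars.lstrip z = z) :
    PySem.Chars.lstrip (PySem.Chars.rstrip z) = PySem.Chars.rstrip z := by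
  cases hr : PySem.Chars.rstrip z with
  | nil => simp [PySem.Chars.lstrip]
  | cons d r =>
    apply pv_lstrip_of_head_false
    obtain ⟨t, ht⟩ := pv_rstrip_prefix z
    rw [hr] at ht
    cases hz : z with
    | nil => rw [hz] at ht; simp at ht
    | cons a b =>
      rw [hz] at ht
      have hda : d = a := by
        simp only [List.cons_append] at ht
        exact (List.cons.injEq _ _ _ _ ▸ ht) |>.1
      subst hda
      rw [hz] at h
      by_contra hcon
      have hsp : PySem.Chars.isspace d = true := by
        cases hx : PySem.Chars.isspace d
        · exact absurd hx hcon
        · rfl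
      rw [PySem.Chars.lstrip, List.dropWhile_cons, hsp] at h
      simp only [if_true] at h
      have := congrArg List.length h
      have hle := List.length_dropWhile_le PySem.Chars.isspace b
      simp at this; omega

theorem pv_rstrip_rstrip (z : List Char) :
    PySem.Chars.rstrip (PySem.Chars.rstrip z) = PySem.Chars.rstrip z := by
  simp only [PySem.Chars.rstrip, List.reverse_reverse]
  congr 1
  cases h : List.dropWhile PySem.Chars.isspace z.reverse with
  | nil => simp
  | cons c t =>
    have := pv_dropWhile_cons_head h
    simp [this]

theorem pv_strip_strip (y : List Char) :
    PySem.Chars.strip (PySem.Chars.strip y) = PySem.Chars.strip y := by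
  have h1 : PySem.Chars.lstrip (PySem.Chars.rstrip (PySem.Chars.lstrip y)) =
      PySem.Chars.rstrip (PySem.Chars.lstrip y) :=
    pv_lstrip_rstrip_of_lstrip _ (pv_lstrip_lstrip y)
  simp only [PySem.Chars.strip]
  rw [h1, pv_rstrip_rstrip]

theorem pv_rstrip_cons_ne {c : Char} {t : List Char} (hc : PySem.Chars.isspace c = false) :
    PySem.Chars.rstrip (c :: t) ≠ [] := by
  intro h
  simp only [PySem.Chars.rstrip, List.reverse_eq_nil_iff] at h
  rw [List.dropWhile_eq_nil_iff] at h
  have := h c (by simp)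
  simp [hc] at this

theorem pv_strip_empty_iff (y : List Char) :
    (PySem.Chars.strip y).isEmpty = (PySem.Chars.lstrip y).isEmpty := by
  cases h : PySem.Chars.lstrip y with
  | nil => simp [PySem.Chars.strip, h, PySem.Chars.rstrip]
  | cons c t =>
    have hc := pv_dropWhile_cons_head (p := PySem.Chars.isspace) (l := y)
      (by simpa [PySem.Chars.lstrip] using h)
    rw [PySem.Chars.strip, h]
    have hne := pv_rstrip_cons_ne (t := t) hc
    simp [hne]

theorem pv_strip_eq_of_lstrip_eq {x y : List Char}
    (h : PySem.Chars.lstrip x = PySem.Chars.lstrip y) :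
    PySem.Chars.strip x = PySem.Chars.strip y := by
  simp [PySem.Chars.strip, h]

theorem pv_lstrip_append (x y : List Char) :
    PySem.Chars.lstrip (x ++ y) =
      if (PySem.Chars.lstrip x).isEmpty then PySem.Chars.lstrip y
      else PySem.Chars.lstrip x ++ y := by
  simp [PySem.Chars.lstrip, List.dropWhile_append]

theorem pv_lstrip_rep (k : Nat) : PySem.Chars.lstrip (List.replicate k ' ') = [] := by
  rw [PySem.Chars.lstrip, List.dropWhile_eq_nil_iff]
  intro x hx
  rw [List.eq_of_mem_replicate hx]
  decide

theorem pv_rstrip_append_rep (z : List Char) (k : Nat) :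
    PySem.Chars.rstrip (z ++ List.replicate k ' ') = PySem.Chars.rstrip z := by
  have hrep : List.dropWhile PySem.Chars.isspace (List.replicate k ' ') = [] := by
    rw [List.dropWhile_eq_nil_iff]
    intro x hx
    rw [List.eq_of_mem_replicate hx]
    decide
  simp [PySem.Chars.rstrip, List.dropWhile_append, List.reverse_replicate, hrep]

theorem pv_strip_append_rep (x : List Char) (k : Nat) :
    PySem.Chars.strip (x ++ List.replicate k ' ') = PySem.Chars.strip x := by
  rw [PySem.Chars.strip, PySem.Chars.strip, pv_lstrip_append]
  by_cases he : (PySem.Chars.lstrip x).isEmpty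
  · rw [if_pos he, pv_lstrip_rep, List.isEmpty_iff.mp he]
  · rw [if_neg he]
    exact pv_rstrip_append_rep _ k

theorem pv_SF_cons (a : List Char) (l : List (List Char)) :
    pvSF (a :: l) =
      (if (PySem.Chars.strip a).isEmpty = false then [PySem.Chars.strip a] else []) ++ pvSF l := by
  by_cases he : (PySem.Chars.strip a).isEmpty = false
  · have he2 : PySem.Chars.strip a ≠ [] := by simpa [List.isEmpty_iff] using he
    simp [pvSF, he2]
  · simp only [Bool.not_eq_false] at he
    have he2 : PySem.Chars.strip a = [] := List.isEmpty_iff.mp he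
    simp [pvSF, he2]

theorem pv_strip_nil : PySem.Chars.strip ([] : List Char) = [] := by
  simp [PySem.Chars.strip, PySem.Chars.lstrip, PySem.Chars.rstrip]

-- filtering A's freshly appended (already stripped) substring keeps it iff it is nonempty
theorem pv_filter_append_emit (subs : List (List Char)) (cur : List Char) :
    (subs ++ [PySem.Chars.strip cur]).filter (fun s => (PySem.Chars.strip s).isEmpty = false) =
      subs.filter (fun s => (PySem.Chars.strip s).isEmpty = false) ++
        (if (PySem.Chars.strip cur).isEmpty = false then [PySem.Chars.strip cur] else []) := by
  rw [List.filter_append]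
  congr 1
  by_cases he : (PySem.Chars.strip cur).isEmpty = false
  · have he2 : PySem.Chars.strip cur ≠ [] := by simpa [List.isEmpty_iff] using he
    simp [pv_strip_strip, he, he2]
  · simp only [Bool.not_eq_false] at he
    have he2 : PySem.Chars.strip cur = [] := List.isEmpty_iff.mp he
    simp [he2, pv_strip_nil]

-- L1: A's fold followed by its post-processing computes pvG
theorem pv_foldA (m : Int) (n : Nat) (hn : (n : Int) = max m 1) :
    ∀ (rest : List Char) (subs : List (List Char)) (cur : List Char) (sp : Nat),
      pvPostA (rest.foldl (pvStepA m) (subs, cur, (sp : Int))) =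
        subs.filter (fun s => (PySem.Chars.strip s).isEmpty = false) ++ pvG n rest cur sp := by
  intro rest
  induction rest with
  | nil =>
    intro subs cur sp
    simp only [List.foldl_nil, pvPostA, pvG]
    by_cases he : (PySem.Chars.strip cur).isEmpty = false
    · rw [if_pos he, if_pos he, pv_filter_append_emit, if_pos he]
    · rw [if_neg he, if_neg he, List.append_nil]
  | cons c rest ih =>
    intro subs cur sp
    rw [List.foldl_cons]
    by_cases hc : c = ' '
    · have hcond : ((sp : Int) ≥ m - 1) ↔ (n ≤ sp + 1) := by omega
      by_cases htr : n ≤ sp + 1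
      · have : pvStepA m (subs, cur, (sp : Int)) c =
            (subs ++ [PySem.Chars.strip cur], [], ((sp + 1 : Nat) : Int)) := by
          rw [pvStepA, if_pos hc, if_pos (hcond.mpr htr)]
          push_cast; ring_nf
        rw [this, ih]
        rw [pv_filter_append_emit]
        rw [pvG, if_pos hc, if_pos htr, List.append_assoc]
      · by_cases he : (PySem.Chars.strip cur).isEmpty = false
        · have : pvStepA m (subs, cur, (sp : Int)) c =
              (subs, cur ++ [' '], ((sp + 1 : Nat) : Int)) := by
            rw [pvStepA, if_pos hc, if_neg (by rw [hcond]; exact htr), if_pos he]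
            push_cast; ring_nf
          rw [this, ih, pvG, if_pos hc, if_neg htr, if_pos he]
        · have : pvStepA m (subs, cur, (sp : Int)) c =
              (subs, cur, ((sp + 1 : Nat) : Int)) := by
            rw [pvStepA, if_pos hc, if_neg (by rw [hcond]; exact htr), if_neg he]
            push_cast; ring_nf
          rw [this, ih, pvG, if_pos hc, if_neg htr, if_neg he]
    · have : pvStepA m (subs, cur, (sp : Int)) c = (subs, cur ++ [c], ((0 : Nat) : Int)) := by
        rw [pvStepA, if_neg hc]
        norm_num
      rw [this, ih, pvG, if_neg hc]

-- L2: pvG against stripped-and-filtered pvH, in both modes of the scan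
theorem pv_g_h (n : Nat) (hn : 1 ≤ n) :
    ∀ (rest : List Char),
      (∀ (cur cur' : List Char) (sp : Nat), sp < n →
        PySem.Chars.lstrip cur = PySem.Chars.lstrip (cur' ++ List.replicate sp ' ') →
        pvG n rest cur sp = pvSF (pvH n rest cur' sp)) ∧
      (∀ (cur' : List Char) (sp : Nat), n ≤ sp →
        pvSF (pvH n rest cur' sp) =
          (if (PySem.Chars.strip cur').isEmpty = false then [PySem.Chars.strip cur'] else []) ++
            pvG n rest [] sp) := by
  intro rest
  induction rest with
  | nil =>
    refine ⟨?_, ?_⟩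
    · intro cur cur' sp hsp hinv
      have hs := pv_strip_eq_of_lstrip_eq hinv
      rw [pvG, pvH, if_neg (by omega : ¬ n ≤ sp), pv_SF_cons, ← hs]
      simp [pvSF]
    · intro cur' sp hsp
      rw [pvH, if_pos hsp, pvG, pv_SF_cons, pv_SF_cons, pv_strip_nil]
      simp [pvSF]
  | cons c rest ih =>
    refine ⟨?_, ?_⟩
    · intro cur cur' sp hsp hinv
      by_cases hc : c = ' '
      · subst hc
        by_cases htr : n ≤ sp + 1
        · rw [pvG, if_pos rfl, if_pos htr, pvH, if_pos rfl]
          rw [ih.2 cur' (sp + 1) htr]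
          have hs : PySem.Chars.strip cur = PySem.Chars.strip cur' := by
            rw [pv_strip_eq_of_lstrip_eq hinv, pv_strip_append_rep]
          rw [hs]
        · rw [pvG, if_pos rfl, if_neg htr, pvH, if_pos rfl]
          have hrep : cur' ++ List.replicate (sp + 1) ' ' =
              (cur' ++ List.replicate sp ' ') ++ [' '] := by
            rw [List.replicate_succ', List.append_assoc]
          by_cases he : (PySem.Chars.strip cur).isEmpty = false
          · rw [if_pos he]
            apply ih.1 _ _ _ (by omega)
            have hlc : (PySem.Chars.lstrip cur).isEmpty = false := by
              rw [← pv_strip_empty_iff]; exact he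
            rw [pv_lstrip_append cur [' '], if_neg (by simp [hlc]), hrep,
              pv_lstrip_append (cur' ++ List.replicate sp ' ') [' '],
              if_neg (by simp [← hinv, hlc]), hinv]
          · rw [if_neg he]
            apply ih.1 _ _ _ (by omega)
            simp only [Bool.not_eq_false] at he
            rw [pv_strip_empty_iff] at he
            have hlc : PySem.Chars.lstrip cur = [] := List.isEmpty_iff.mp he
            rw [hlc, hrep, pv_lstrip_append (cur' ++ List.replicate sp ' ') [' '],
              if_pos (by simp [← hinv, hlc])]
            have : PySem.Chars.lstrip [' '] = [] := pv_lstrip_rep 1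
            rw [this]
      · rw [pvG, if_neg hc, pvH, if_neg hc, if_neg (by omega : ¬ n ≤ sp)]
        apply ih.1 _ _ _ hn
        rw [List.replicate_zero, List.append_nil]
        rw [pv_lstrip_append cur [c], pv_lstrip_append (cur' ++ List.replicate sp ' ') [c], hinv]
    · intro cur' sp hsp
      by_cases hc : c = ' '
      · subst hc
        rw [pvH, if_pos rfl, pvG, if_pos rfl, if_pos (by omega : n ≤ sp + 1)]
        rw [ih.2 cur' (sp + 1) (by omega)]
        rw [pv_strip_nil]
        simp
      · rw [pvH, if_neg hc, if_pos hsp, pvG, if_neg hc, pv_SF_cons]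
        simp only [List.nil_append]
        rw [ih.1 [c] [c] 0 (by omega) (by simp)]
-- L3a: pvH just counts pending spaces
theorem pv_h_rep (n : Nat) :
    ∀ (k : Nat) (rest cur : List Char) (sp : Nat),
      pvH n (List.replicate k ' ' ++ rest) cur sp = pvH n rest cur (sp + k) := by
  intro k
  induction k with
  | zero => intro rest cur sp; simp
  | succ k ih =>
    intro rest cur sp
    rw [List.replicate_succ, List.cons_append, pvH, if_pos rfl, ih]
    congr 1
    omega

theorem pv_cons_rep (r : Nat) (l : List Char) :
    ' ' :: (List.replicate r ' ' ++ l) = List.replicate r ' ' ++ (' ' :: l) := by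
  induction r with
  | zero => simp
  | succ r ih => simp [List.replicate_succ, ih]

-- L3: B's run-at-a-time splitter equals the character-at-a-time one
theorem pv_splitRuns_h (n : Nat) (hn : 1 ≤ n) :
    ∀ (N : Nat) (rest : List Char), rest.length ≤ N → ∀ (acc : List Char),
      pvSplitRuns n acc rest = pvH n rest acc.reverse 0 := by
  intro N
  induction N with
  | zero =>
    intro rest hlen acc
    have : rest = [] := List.length_eq_zero_iff.mp (Nat.le_zero.mp hlen)
    subst this
    rw [pvSplitRuns, pvH, if_neg (by omega : ¬ n ≤ 0)]
    simp
  | succ N ihN =>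
    intro rest hlen acc
    cases rest with
    | nil =>
      rw [pvSplitRuns, pvH, if_neg (by omega : ¬ n ≤ 0)]
      simp
    | cons c rest' =>
      by_cases hc : c = ' '
      · subst hc
        rw [pvSplitRuns, if_pos rfl]
        set r : Nat := (List.takeWhile (fun d => d == ' ') rest').length with hrdef
        have htw : List.takeWhile (fun d => d == ' ') rest' = List.replicate r ' ' := by
          rw [hrdef]
          apply List.eq_replicate_of_mem
          intro b hb
          have := List.mem_takeWhile_imp hb
          simpa using this
        have hsplit : (' ' :: rest') =
            List.replicate (r + 1) ' ' ++ List.dropWhile (fun d => d == ' ') rest' := by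
          rw [List.replicate_succ, List.cons_append, ← htw, List.takeWhile_append_dropWhile]
        have hlen' : (List.dropWhile (fun d => d == ' ') rest').length ≤ N := by
          have := List.length_dropWhile_le (fun d => d == ' ') rest'
          simp only [List.length_cons] at hlen
          omega
        have hhdrop : ∀ d t, List.dropWhile (fun d => d == ' ') rest' = d :: t → d ≠ ' ' := by
          intro d t hdt hd
          have := pv_dropWhile_cons_head hdt
          simp [hd] at this
        rw [show pvH n (' ' :: rest') acc.reverse 0 =
            pvH n (List.dropWhile (fun d => d == ' ') rest') acc.reverse (r + 1) by
          conv_lhs => rw [hsplit]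
          rw [pv_h_rep]; congr 1; omega]
        simp only [List.length_cons, ← hrdef]
        have h0 : ¬ n ≤ 0 := by omega
        by_cases hnr : n ≤ r + 1
        · rw [if_pos (by simpa using hnr)]
          rw [ihN _ hlen' []]
          cases hdt : List.dropWhile (fun d => d == ' ') rest' with
          | nil => simp [pvH, hnr, h0]
          | cons d t =>
            have hd := hhdrop d t hdt
            simp [pvH, hd, hnr, h0]
        · rw [if_neg (by simpa using hnr)]
          rw [ihN _ hlen']
          cases hdt : List.dropWhile (fun d => d == ' ') rest' with
          | nil =>
            simp [pvH, hnr, h0, htw, List.reverse_append, List.reverse_replicate,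
              List.replicate_succ']
            simpa using pv_cons_rep r []
          | cons d t =>
            have hd := hhdrop d t hdt
            simp [pvH, hd, hnr, h0, htw, List.reverse_append, List.reverse_replicate,
              List.replicate_succ']
            rw [pv_cons_rep r [d]]
      · rw [pvSplitRuns, if_neg hc]
        rw [ihN rest' (by simp only [List.length_cons] at hlen; omega) (c :: acc)]
        rw [pvH, if_neg hc, if_neg (by omega : ¬ n ≤ 0)]
        simp

-- ===== VERDICT (by name: the statement is the Claim_ definition above) =====
theorem string_divide_spec : Claim_equal_string_divide := by
  intro s m _
  show string_divide s m = string_divide_alt s m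
  have hmax : (1 : Int) ≤ max m 1 := le_max_right m 1
  set n : Nat := (max m 1).toNat with hndef
  have hn : (n : Int) = max m 1 := by omega
  have hn1 : 1 ≤ n := by omega
  have hA : string_divide s m =
      (pvPostA (s.toList.foldl (pvStepA m) ([], [], ((0 : Nat) : Int)))).map String.ofList := by
    rw [string_divide, pvPostA]
    norm_num
  have hB : string_divide_alt s m = (pvSF (pvSplitRuns n [] s.toList)).map String.ofList := by
    rw [string_divide_alt, pvSF, hndef]
  rw [hA, hB, pv_foldA m n hn s.toList [] [] 0]
  rw [(pv_g_h n hn1 s.toList).1 [] [] 0 hn1 (by simp)]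
  rw [pv_splitRuns_h n hn1 s.toList.length s.toList le_rfl []]
  simp
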